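-- pv_equiv track=rewrite | github.com/cosmicomic/computing-austen | prepare_text.py | sort_samples_by_cluster
-- ===== SOURCE A (Python) =====
-- def sort_samples_by_cluster(labels, samples):
--     cluster_dict = {}
--     for i in range(len(samples)):
--         if labels[i] not in cluster_dict:
--             cluster_dict[labels[i]] = [samples[i]]
--         else:
--             cluster_dict[labels[i]].append(samples[i])
--
--     return cluster_dict
-- ===== SOURCE B (Python) =====
-- def sort_samples_by_cluster(labels, samples):
--     pairs = list(zip(labels, samples))
--     seen = []
--     for lab, _ in pairs:
--         if lab not in seen:
--             seen.append(lab)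
--     return {lab: [s for l, s in pairs if l == lab] for lab in seen}
-- ===== Notes on version B (the rewrite author's own statement) =====
-- stated objective: alternative
-- what changed: Replaces the single grouping pass over a mutated dict with a first-occurrence key-collection pass over zip(labels, samples) followed by a per-key filtering pass building each group independently.
import Mathlib
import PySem

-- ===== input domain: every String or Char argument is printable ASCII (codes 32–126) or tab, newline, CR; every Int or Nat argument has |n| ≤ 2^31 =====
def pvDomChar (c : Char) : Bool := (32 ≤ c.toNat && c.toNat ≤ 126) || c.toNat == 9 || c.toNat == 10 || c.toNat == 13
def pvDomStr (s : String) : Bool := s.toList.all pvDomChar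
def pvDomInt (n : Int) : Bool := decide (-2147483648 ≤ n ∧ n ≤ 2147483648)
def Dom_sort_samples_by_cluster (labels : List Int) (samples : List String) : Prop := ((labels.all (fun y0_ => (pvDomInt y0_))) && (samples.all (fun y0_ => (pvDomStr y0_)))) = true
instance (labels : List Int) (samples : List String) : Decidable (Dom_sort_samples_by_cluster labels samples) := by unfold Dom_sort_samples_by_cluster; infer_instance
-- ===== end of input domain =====

-- B groups by two passes over zip(labels, samples) — collect first-occurrence labels, then filter
-- the samples of each label — instead of A's single dict-mutating index loop (alternative decomposition).

-- ===== PORT A =====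
-- for i in range(len(samples)): if labels[i] not in d: d[labels[i]] = [samples[i]] else: d[labels[i]].append(samples[i])
-- (pyGetD is the total form of labels[i]/samples[i]; Pre_ keeps every index in range)
def sort_samples_by_cluster (labels : List Int) (samples : List String) : List (Int × List String) :=
  ((PySem.List.pyRange 0 (PySem.List.len samples) 1).foldl
    (fun (d : PySem.Dict Int (List String)) i =>
      let lab := PySem.List.pyGetD labels i 0
      let s := PySem.List.pyGetD samples i ""
      if d.contains lab = false then d.insert lab [s]
      else d.insert lab (d.getD lab [] ++ [s]))
    PySem.Dict.empty).items

-- ===== PORT B =====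
def sort_samples_by_cluster_alt (labels : List Int) (samples : List String) : List (Int × List String) :=
  let pairs := labels.zip samples
  let seen : PySem.Set Int := pairs.foldl (fun acc p => PySem.Set.add acc p.1) PySem.Set.empty
  seen.map (fun lab => (lab, (pairs.filter (fun p => p.1 == lab)).map (·.2)))

-- ===== PRECONDITION & SPEC =====
-- A indexes labels[i] for every i < len(samples): it raises IndexError when samples is longer than labels.
def Pre_sort_samples_by_cluster (labels : List Int) (samples : List String) : Prop :=
  samples.length ≤ labels.length
instance (labels : List Int) (samples : List String) : Decidable (Pre_sort_samples_by_cluster labels samples) := by unfold Pre_sort_samples_by_cluster; infer_instance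

def pvWitness_sort_samples_by_cluster : List Int × List String := ([1, 2, 1], ["x", "y", "z"])

def Spec_sort_samples_by_cluster (labels : List Int) (samples : List String) (out : List (Int × List String)) : Prop := out = sort_samples_by_cluster_alt labels samples
instance (labels : List Int) (samples : List String) (out : List (Int × List String)) : Decidable (Spec_sort_samples_by_cluster labels samples out) := by unfold Spec_sort_samples_by_cluster; infer_instance

-- ===== CLAIM (what is proved, stated in full; the proofs are below) =====
def Claim_equal_sort_samples_by_cluster : Prop := ∀ (labels : List Int) (samples : List String), Dom_sort_samples_by_cluster labels samples → Pre_sort_samples_by_cluster labels samples → Spec_sort_samples_by_cluster labels samples (sort_samples_by_cluster labels samples)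

-- ===== LEMMAS AND PROOFS =====

-- The indexed pairs (labels[k], samples[k]) for k < len(samples) are exactly zip(labels, samples)
-- once samples is no longer than labels.
lemma zip_eq_map_range : ∀ (labels : List Int) (samples : List String), samples.length ≤ labels.length →
    (List.range samples.length).map (fun k => (labels.getD k 0, samples.getD k "")) = labels.zip samples := by
  intro labels samples
  induction samples generalizing labels with
  | nil => simp
  | cons s ss ih =>
    intro h
    cases labels with
    | nil => simp at h
    | cons l ls =>
      simp only [List.length_cons, List.range_succ_eq_map, List.map_cons, List.map_map, List.zip_cons_cons]
      refine congrArg (_ :: ·) ?_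
      rw [← ih ls (by simpa using h)]
      rfl

lemma range_map_eq_zip (labels : List Int) (samples : List String)
    (h : samples.length ≤ labels.length) :
    (PySem.List.pyRange 0 (PySem.List.len samples) 1).map
      (fun i => (PySem.List.pyGetD labels i 0, PySem.List.pyGetD samples i "")) =
    labels.zip samples := by
  rw [PySem.List.len_eq, PySem.List.pyRange_one, List.map_map, ← zip_eq_map_range labels samples h]
  simp [Function.comp, PySem.List.pyGetD_natCast]

-- A's two branches are exactly Dict.modify with default [].
lemma step_eq_modify (d : PySem.Dict Int (List String)) (p : Int × String) :
    (if d.contains p.1 = false then d.insert p.1 [p.2]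
     else d.insert p.1 (d.getD p.1 [] ++ [p.2])) =
    d.modify p.1 [] (· ++ [p.2]) := by
  simp only [PySem.Dict.modify]
  by_cases hc : d.contains p.1 = true
  · simp [hc]
  · have hg := PySem.Dict.getD_of_not_contains d ([] : List String) (by simpa using hc)
    simp [hc, hg]

-- A nodup-keyed dict's items are its keys paired with their getD values.
lemma items_eq_keys_map (d : PySem.Dict Int (List String)) (h : d.keys.Nodup) :
    d.items = d.keys.map (fun k => (k, d.getD k [])) := by
  simp only [PySem.Dict.keys, List.map_map]
  conv_lhs => rw [← List.map_id d.items]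
  refine (List.map_congr_left ?_).symm
  intro p hp
  have := PySem.Dict.getD_of_mem_items d (k := p.1) (v := p.2) (by simpa using hp) h ([] : List String)
  simp [Function.comp, this]

lemma main_eq (labels : List Int) (samples : List String) (h : samples.length ≤ labels.length) :
    sort_samples_by_cluster labels samples = sort_samples_by_cluster_alt labels samples := by
  unfold sort_samples_by_cluster sort_samples_by_cluster_alt
  set pairs := labels.zip samples with hpairs
  have hA : (PySem.List.pyRange 0 (PySem.List.len samples) 1).foldl
      (fun (d : PySem.Dict Int (List String)) i =>
        let lab := PySem.List.pyGetD labels i 0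
        let s := PySem.List.pyGetD samples i ""
        if d.contains lab = false then d.insert lab [s]
        else d.insert lab (d.getD lab [] ++ [s]))
      PySem.Dict.empty
      = pairs.foldl (fun d p => d.modify p.1 [] (· ++ [p.2])) PySem.Dict.empty := by
    rw [hpairs, ← range_map_eq_zip labels samples h, List.foldl_map]
    congr 1
    funext d i
    show (if d.contains (PySem.List.pyGetD labels i 0) = false then _ else _) = _
    exact step_eq_modify d (PySem.List.pyGetD labels i 0, PySem.List.pyGetD samples i "")
  rw [hA]
  set D := pairs.foldl (fun d p => d.modify p.1 [] (· ++ [p.2])) PySem.Dict.empty with hD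
  have hnodup : D.keys.Nodup := by
    rw [hD]
    exact PySem.Dict.nodup_keys_foldl_modify_key pairs Prod.fst [] (fun _ p => (· ++ [p.2])) PySem.Dict.empty (by simp [PySem.Dict.keys_empty])
  have hkeys : D.keys = pairs.foldl (fun acc p => PySem.Set.add acc p.1) PySem.Set.empty := by
    rw [hD, PySem.Dict.keys_foldl_modify_key pairs Prod.fst [] (fun _ p => (· ++ [p.2])) PySem.Dict.empty,
        PySem.Dict.keys_empty]
    show PySem.Set.update PySem.Set.empty (pairs.map Prod.fst) = _
    simp only [PySem.Set.update, List.foldl_map]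
  rw [items_eq_keys_map D hnodup, hkeys]
  refine List.map_congr_left ?_
  intro k _
  refine congrArg (fun v => (k, v)) ?_
  rw [hD]
  have := PySem.Dict.getD_foldl_modify_append pairs PySem.Dict.empty k
  simpa [PySem.Dict.getD_empty] using this

-- ===== VERDICT (by name: the statement is the Claim_ definition above) =====
theorem sort_samples_by_cluster_spec : Claim_equal_sort_samples_by_cluster := by
  intro labels samples _ hpre
  unfold Spec_sort_samples_by_cluster
  exact main_eq labels samples hpre
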